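-- pv_equiv track=rewrite | github.com/grandeurkoe/data-structures-and-algorithms | data-structures/hash-tables-or-dictionaries/first-recurring-character/main.py | first_recurring_character_using_nested_loops
-- ===== SOURCE A (Python) =====
-- def first_recurring_character_using_nested_loops(sample):
--     """Get first recurring character using nested loops. Return first recurring character"""
--     recurring_char = None
--     recurring_distance = len(sample) - 1
--     while True:
--         for sample_index in range(len(sample)):
--             for check_index in range(sample_index + 1, len(sample)):
--                 if sample[sample_index] == sample[check_index]:
--                     if (check_index - sample_index) < recurring_distance:
--                         recurring_distance = check_index - sample_index
--                         recurring_char = sample[sample_index]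
--         if recurring_distance == len(sample) - 1:
--             if sample[0] == sample[-1]:
--                 return sample[0]
--             else:
--                 return None
--         elif recurring_distance < len(sample) - 1:
--             return recurring_char
-- ===== SOURCE B (Python) =====
-- def first_recurring_character_using_nested_loops(sample):
--     """Single pass with a dict of last-seen indices: track the minimal gap
--     between equal characters and the first character achieving it."""
--     last_seen = {}
--     best_gap = None
--     best_char = None
--     for j, ch in enumerate(sample):
--         if ch in last_seen:
--             gap = j - last_seen[ch]
--             if best_gap is None or gap < best_gap:
--                 best_gap = gap
--                 best_char = ch
--         last_seen[ch] = j
--     return best_char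
-- ===== Notes on version B (the rewrite author's own statement) =====
-- stated objective: faster
-- what changed: Replaces the all-pairs nested scan (plus a redundant while-True wrapper and a special first==last fixup) with a single left-to-right pass keeping a dict of each character's last-seen index, updating the minimal gap and its first character on the fly.
-- intended difference: On one-character strings A returns that character (its first==last fallback compares the single character with itself) although nothing recurs; B returns None, the intended answer when no character occurs twice. — e.g. on first_recurring_character_using_nested_loops("a"): A returns some "a", B returns none
import Mathlib
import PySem

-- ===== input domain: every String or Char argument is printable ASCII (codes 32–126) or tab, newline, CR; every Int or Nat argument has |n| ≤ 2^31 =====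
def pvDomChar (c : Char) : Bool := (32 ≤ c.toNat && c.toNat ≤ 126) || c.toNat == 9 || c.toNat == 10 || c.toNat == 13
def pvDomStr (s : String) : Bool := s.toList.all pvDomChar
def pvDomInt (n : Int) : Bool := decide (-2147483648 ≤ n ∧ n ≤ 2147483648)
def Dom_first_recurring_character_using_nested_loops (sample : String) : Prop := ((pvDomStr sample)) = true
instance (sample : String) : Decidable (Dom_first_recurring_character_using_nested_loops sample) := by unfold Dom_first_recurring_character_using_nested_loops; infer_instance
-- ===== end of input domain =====

-- B replaces A's O(n^2) all-pairs scan by one pass with a dict of last-seen indices;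
-- equivalence is proved on nonempty strings (A raises IndexError on "") outside D_ (one-character strings).

-- ===== PORT A =====
def first_recurring_character_using_nested_loops (sample : String) : Option String :=
  -- while True: the body always returns on its first run (recurring_distance never exceeds len-1),
  -- so the loop is ported as one execution of its body.
  match (PySem.List.pyRange 0 (sample.toList.length : Int) 1).foldl (fun st i =>
      (PySem.List.pyRange (i + 1) (sample.toList.length : Int) 1).foldl (fun (st : Int × Option String) j =>
        match PySem.List.pyGet? sample.toList i, PySem.List.pyGet? sample.toList j with
        | some a, some b =>
            if a == b then
              if j - i < st.1 then (j - i, some (String.ofList [a])) else st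
            else st
        | _, _ => st) st) ((sample.toList.length : Int) - 1, (none : Option String)) with
  | (recurring_distance, recurring_char) =>
    if recurring_distance == (sample.toList.length : Int) - 1 then
      match PySem.List.pyGet? sample.toList 0, PySem.List.pyGet? sample.toList (-1) with
      | some a, some b => if a == b then some (String.ofList [a]) else none
      | _, _ => none   -- IndexError on the empty string: excluded by Pre_
    else if recurring_distance < (sample.toList.length : Int) - 1 then recurring_char
    else none  -- unreachable: recurring_distance only decreases from len-1 (Python would re-run the while body with identical state)

-- ===== PORT B =====
def first_recurring_character_using_nested_loops_alt (sample : String) : Option String :=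
  match (PySem.List.enumerate sample.toList).foldl
      (fun (st : PySem.Dict Char Int × Option Int × Option String) p =>
        let sel :=
          match PySem.Dict.get? st.1 p.2 with
          | some i =>
              let gap := p.1 - i
              match st.2.1 with
              | none => (some gap, some (String.ofList [p.2]))
              | some g => if gap < g then (some gap, some (String.ofList [p.2])) else st.2
          | none => st.2
        (PySem.Dict.insert st.1 p.2 p.1, sel))
      (PySem.Dict.empty, none, none) with
  | (_last_seen, _best_gap, best_char) => best_char

-- ===== PRECONDITION & SPEC =====
-- Pre_ excludes only the empty string, on which A raises IndexError (sample[0]).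
def Pre_first_recurring_character_using_nested_loops (sample : String) : Prop := sample.toList ≠ []
instance (sample : String) : Decidable (Pre_first_recurring_character_using_nested_loops sample) := by unfold Pre_first_recurring_character_using_nested_loops; infer_instance
def pvWitness_first_recurring_character_using_nested_loops : String := "abcb"

-- On one-character strings A returns that character (its first==last fallback compares the single
-- character with itself) although nothing recurs; B returns none, the intended answer when no
-- character occurs twice.
def D_first_recurring_character_using_nested_loops (sample : String) : Prop := sample.toList.length = 1
instance (sample : String) : Decidable (D_first_recurring_character_using_nested_loops sample) := by unfold D_first_recurring_character_using_nested_loops; infer_instance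

def Spec_first_recurring_character_using_nested_loops (sample : String) (out : Option String) : Prop := ¬ D_first_recurring_character_using_nested_loops sample → out = first_recurring_character_using_nested_loops_alt sample
instance (sample : String) (out : Option String) : Decidable (Spec_first_recurring_character_using_nested_loops sample out) := by unfold Spec_first_recurring_character_using_nested_loops; infer_instance

def pvDiffWitness_first_recurring_character_using_nested_loops : String := "a"
def pvDiffWitnessOut_first_recurring_character_using_nested_loops : (Option String) × (Option String) := (some "a", none)

-- ===== CLAIM (what is proved, stated in full; the proofs are below) =====
def Claim_unchanged_first_recurring_character_using_nested_loops : Prop := ∀ (sample : String), Dom_first_recurring_character_using_nested_loops sample → Pre_first_recurring_character_using_nested_loops sample → Spec_first_recurring_character_using_nested_loops sample (first_recurring_character_using_nested_loops sample)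
def Claim_changed_first_recurring_character_using_nested_loops : Prop := Dom_first_recurring_character_using_nested_loops (pvDiffWitness_first_recurring_character_using_nested_loops) ∧ Pre_first_recurring_character_using_nested_loops (pvDiffWitness_first_recurring_character_using_nested_loops) ∧ D_first_recurring_character_using_nested_loops (pvDiffWitness_first_recurring_character_using_nested_loops) ∧ first_recurring_character_using_nested_loops (pvDiffWitness_first_recurring_character_using_nested_loops) = pvDiffWitnessOut_first_recurring_character_using_nested_loops.1 ∧ first_recurring_character_using_nested_loops_alt (pvDiffWitness_first_recurring_character_using_nested_loops) = pvDiffWitnessOut_first_recurring_character_using_nested_loops.2 ∧ pvDiffWitnessOut_first_recurring_character_using_nested_loops.1 ≠ pvDiffWitnessOut_first_recurring_character_using_nested_loops.2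
def Claim_exact_first_recurring_character_using_nested_loops : Prop := ∀ (sample : String), Dom_first_recurring_character_using_nested_loops sample → Pre_first_recurring_character_using_nested_loops sample → D_first_recurring_character_using_nested_loops sample → first_recurring_character_using_nested_loops sample ≠ first_recurring_character_using_nested_loops_alt sample
-- ===== LEMMAS AND PROOFS =====

def frcUpdA (st : Int × Option String) (e : Int × String) : Int × Option String :=
  if e.1 < st.1 then (e.1, some e.2) else st

def frcUpdB (st : Option Int × Option String) (e : Int × String) : Option Int × Option String :=
  match st.1 with
  | none => (some e.1, some e.2)
  | some g => if e.1 < g then (some e.1, some e.2) else st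

def frcFirstMin : List (Int × String) → Option (Int × String)
  | [] => none
  | e :: L => match frcFirstMin L with
    | none => some e
    | some f => if e.1 ≤ f.1 then some e else some f

theorem frc_selA (L : List (Int × String)) : ∀ (t : Int) (c : Option String),
    L.foldl frcUpdA (t, c) = match frcFirstMin L with
      | none => (t, c)
      | some f => if f.1 < t then (f.1, some f.2) else (t, c) := by
  induction L with
  | nil => intro t c; simp [frcFirstMin]
  | cons e L ih =>
    intro t c
    simp only [List.foldl_cons, frcFirstMin, frcUpdA]
    by_cases h : e.1 < t
    · simp only [if_pos h, ih]
      rcases hfm : frcFirstMin L with _ | f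
      · simp [h]
      · by_cases h2 : e.1 ≤ f.1
        · have : ¬ f.1 < e.1 := by omega
          simp [h2, this, h]
        · have : f.1 < e.1 := by omega
          simp [h2, this]
          omega
    · simp only [if_neg h, ih]
      rcases hfm : frcFirstMin L with _ | f
      · simp [h]
      · by_cases h2 : e.1 ≤ f.1
        · have : ¬ f.1 < t := by omega
          simp [h2, this, h]
        · simp [h2]

theorem frc_selB_some (L : List (Int × String)) : ∀ (g : Int) (c : Option String),
    L.foldl frcUpdB (some g, c) = match frcFirstMin L with
      | none => (some g, c)
      | some f => if f.1 < g then (some f.1, some f.2) else (some g, c) := by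
  induction L with
  | nil => intro g c; simp [frcFirstMin]
  | cons e L ih =>
    intro g c
    simp only [List.foldl_cons, frcFirstMin, frcUpdB]
    by_cases h : e.1 < g
    · simp only [if_pos h, ih]
      rcases hfm : frcFirstMin L with _ | f
      · simp [h]
      · by_cases h2 : e.1 ≤ f.1
        · have : ¬ f.1 < e.1 := by omega
          simp [h2, this, h]
        · have : f.1 < e.1 := by omega
          simp [h2, this]
          omega
    · simp only [if_neg h, ih]
      rcases hfm : frcFirstMin L with _ | f
      · simp [h]
      · by_cases h2 : e.1 ≤ f.1
        · have : ¬ f.1 < g := by omega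
          simp [h2, this, h]
        · simp [h2]

theorem frc_selB_none (L : List (Int × String)) :
    L.foldl frcUpdB (none, none) = match frcFirstMin L with
      | none => ((none : Option Int), (none : Option String))
      | some f => (some f.1, some f.2) := by
  cases L with
  | nil => simp [frcFirstMin]
  | cons e L =>
    simp only [List.foldl_cons, frcFirstMin, frcUpdB, frc_selB_some]
    rcases hfm : frcFirstMin L with _ | f
    · simp
    · by_cases h2 : e.1 ≤ f.1
      · have : ¬ f.1 < e.1 := by omega
        simp [h2, this]
      · have : f.1 < e.1 := by omega
        simp [h2, this]

theorem frc_firstMin_min (f : Int × String) (L : List (Int × String))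
    (h : ∀ e ∈ L, f.1 ≤ e.1) : frcFirstMin (f :: L) = some f := by
  induction L with
  | nil => simp [frcFirstMin]
  | cons e L ih =>
    have he : f.1 ≤ e.1 := h e (by simp)
    have ih' := ih (fun x hx => h x (by simp [hx]))
    simp only [frcFirstMin] at ih' ⊢
    rcases hfm : frcFirstMin L with _ | g
    · simp [hfm] at ih' ⊢
      simp [he]
    · simp [hfm] at ih' ⊢
      by_cases h1 : e.1 ≤ g.1
      · simp [h1]; omega
      · simp [h1]
        exact ih'

theorem frc_firstMin_eq (L1 L2 : List (Int × String)) (f : Int × String)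
    (h1 : ∀ e ∈ L1, f.1 < e.1) (h2 : ∀ e ∈ L2, f.1 ≤ e.1) :
    frcFirstMin (L1 ++ f :: L2) = some f := by
  induction L1 with
  | nil => simpa using frc_firstMin_min f L2 h2
  | cons e L1 ih =>
    have hef : f.1 < e.1 := h1 e (by simp)
    have ih' := ih (fun x hx => h1 x (by simp [hx]))
    simp only [List.cons_append, frcFirstMin, ih']
    have : ¬ e.1 ≤ f.1 := by omega
    simp [this]

theorem frc_firstMin_nil : frcFirstMin [] = none := rfl

def frcCandA (s : List Char) : List (Int × String) :=
  (List.range s.length).flatMap (fun i =>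
    (List.range' (i+1) (s.length - (i+1))).filterMap (fun j =>
      if s.getD i ' ' = s.getD j ' ' then
        some (((j : Int) - (i : Int)), String.ofList [s.getD i ' '])
      else none))

theorem frc_inner (s : List Char) (i : Nat) (hi : i < s.length) (st : Int × Option String) :
    (PySem.List.pyRange ((i : Int) + 1) (s.length : Int) 1).foldl (fun (st : Int × Option String) j =>
        match PySem.List.pyGet? s (i : Int), PySem.List.pyGet? s j with
        | some a, some b =>
            if a == b then
              if j - (i : Int) < st.1 then (j - (i : Int), some (String.ofList [a])) else st
            else st
        | _, _ => st) st
    = ((List.range' (i+1) (s.length - (i+1))).filterMap (fun j =>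
        if s.getD i ' ' = s.getD j ' ' then
          some (((j : Int) - (i : Int)), String.ofList [s.getD i ' '])
        else none)).foldl frcUpdA st := by
  rw [List.foldl_filterMap, PySem.List.pyRange_one, List.foldl_map,
      List.range'_eq_map_range, List.foldl_map]
  have hcount : ((s.length : Int) - ((i : Int) + 1)).toNat = s.length - (i + 1) := by omega
  rw [hcount]
  apply PySem.List.foldl_congr_mem
  intro acc k hk
  have hkn : k < s.length - (i + 1) := List.mem_range.mp hk
  have hj : i + 1 + k < s.length := by omega
  have hcast : (i : Int) + 1 + (k : Int) = ((i + 1 + k : Nat) : Int) := by push_cast; ring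
  rw [hcast, PySem.List.pyGet?_natCast, PySem.List.pyGet?_natCast]
  rw [List.getElem?_eq_getElem hi, List.getElem?_eq_getElem hj]
  have hgi : s.getD i ' ' = s[i] := List.getD_eq_getElem s ' ' hi
  have hgj : s.getD (i + 1 + k) ' ' = s[i + 1 + k] := List.getD_eq_getElem s ' ' hj
  rw [hgi, hgj]
  by_cases heq : s[i] = s[i + 1 + k]
  · simp only [heq, beq_self_eq_true, if_true, if_pos rfl, frcUpdA, heq]
  · have : ¬ (s[i] == s[i + 1 + k]) = true := by simp [heq]
    simp only [if_neg heq, this, Bool.false_eq_true, if_false]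

theorem frc_portA_fold (s : List Char) (init : Int × Option String) :
    (PySem.List.pyRange 0 (s.length : Int) 1).foldl (fun st i =>
      (PySem.List.pyRange (i + 1) (s.length : Int) 1).foldl (fun (st : Int × Option String) j =>
        match PySem.List.pyGet? s i, PySem.List.pyGet? s j with
        | some a, some b =>
            if a == b then
              if j - i < st.1 then (j - i, some (String.ofList [a])) else st
            else st
        | _, _ => st) st) init
    = (frcCandA s).foldl frcUpdA init := by
  rw [frcCandA, List.foldl_flatMap, PySem.List.pyRange_zero_natCast, List.foldl_map]
  apply PySem.List.foldl_congr_mem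
  intro acc i hi
  have hin : i < s.length := List.mem_range.mp hi
  simpa using frc_inner s i hin acc

def frcCollect : PySem.Dict Char Int → List (Int × Char) → List (Int × String)
  | _, [] => []
  | d, p :: l =>
    match PySem.Dict.get? d p.2 with
    | some i => (p.1 - i, String.ofList [p.2]) :: frcCollect (d.insert p.2 p.1) l
    | none => frcCollect (d.insert p.2 p.1) l

theorem frc_portB_fold (l : List (Int × Char)) : ∀ (d : PySem.Dict Char Int) (sel : Option Int × Option String),
    (l.foldl (fun (st : PySem.Dict Char Int × Option Int × Option String) p =>
        let sel :=
          match PySem.Dict.get? st.1 p.2 with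
          | some i =>
              let gap := p.1 - i
              match st.2.1 with
              | none => (some gap, some (String.ofList [p.2]))
              | some g => if gap < g then (some gap, some (String.ofList [p.2])) else st.2
          | none => st.2
        (PySem.Dict.insert st.1 p.2 p.1, sel)) (d, sel)).2
    = (frcCollect d l).foldl frcUpdB sel := by
  induction l with
  | nil => intro d sel; simp [frcCollect]
  | cons p l ih =>
    intro d sel
    simp only [List.foldl_cons, frcCollect]
    rcases hget : PySem.Dict.get? d p.2 with _ | i
    · simp only [ih]
    · simp only [ih, List.foldl_cons, frcUpdB]

theorem frc_portB_fold_match (l : List (Int × Char)) (d : PySem.Dict Char Int) (sel : Option Int × Option String) :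
    (match l.foldl (fun (st : PySem.Dict Char Int × Option Int × Option String) p =>
        let sel :=
          match PySem.Dict.get? st.1 p.2 with
          | some i =>
              let gap := p.1 - i
              match st.2.1 with
              | none => (some gap, some (String.ofList [p.2]))
              | some g => if gap < g then (some gap, some (String.ofList [p.2])) else st.2
          | none => st.2
        (PySem.Dict.insert st.1 p.2 p.1, sel)) (d, sel) with
     | (_last_seen, _best_gap, best_char) => best_char)
    = ((frcCollect d l).foldl frcUpdB sel).2 := by
  show (l.foldl _ (d, sel)).2.2 = _
  rw [frc_portB_fold l d sel]

def frcCandsFrom (e : Char → Option Int) (k : Int) : List Char → List (Int × String)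
  | [] => []
  | x :: l =>
    match e x with
    | some i => (k - i, String.ofList [x]) :: frcCandsFrom (fun c => if c == x then some k else e c) (k + 1) l
    | none => frcCandsFrom (fun c => if c == x then some k else e c) (k + 1) l

theorem frc_collect_eq_candsFrom (l : List Char) : ∀ (k : Int) (d : PySem.Dict Char Int) (e : Char → Option Int),
    (∀ c, PySem.Dict.get? d c = e c) →
    frcCollect d (PySem.List.enumerate l k) = frcCandsFrom e k l := by
  induction l with
  | nil => intro k d e _; simp [frcCollect, frcCandsFrom, PySem.List.enumerate_nil]
  | cons x l ih =>
    intro k d e he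
    rw [PySem.List.enumerate_cons]
    simp only [frcCollect, frcCandsFrom, he x]
    have hstep : ∀ c, PySem.Dict.get? (d.insert x k) c = if c == x then some k else e c := by
      intro c
      by_cases hc : c = x
      · subst hc; simp [PySem.Dict.get?_insert_self]
      · rw [PySem.Dict.get?_insert_of_ne _ _ hc, he c, if_neg (by simp [hc])]
    rcases e x with _ | i
    · exact ih (k + 1) _ _ hstep
    · simp only []
      rw [ih (k + 1) _ _ hstep]

def frcLast (s : List Char) (m : Nat) (c : Char) : Option Nat :=
  ((List.range m).reverse).find? (fun i => s.getD i ' ' == c)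

def frcCandB (s : List Char) : List (Int × String) :=
  (List.range s.length).filterMap (fun j =>
    (frcLast s j (s.getD j ' ')).map (fun i => (((j : Int) - (i : Int)), String.ofList [s.getD j ' '])))

theorem frcLast_zero (s : List Char) (c : Char) : frcLast s 0 c = none := rfl

theorem frcLast_succ (s : List Char) (m : Nat) (c : Char) :
    frcLast s (m + 1) c = if s.getD m ' ' = c then some m else frcLast s m c := by
  unfold frcLast
  rw [List.range_succ, List.reverse_append]
  simp only [List.reverse_singleton, List.singleton_append, List.find?_cons]
  by_cases h : s.getD m ' ' = c
  · rw [show (s.getD m ' ' == c) = true from by simp only [beq_iff_eq]; exact h, if_pos h]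
  · rw [show (s.getD m ' ' == c) = false from by simp only [beq_eq_false_iff_ne]; exact h, if_neg h]

theorem frcLast_congr (s s' : List Char) (m : Nat) (c : Char)
    (h : ∀ i < m, s.getD i ' ' = s'.getD i ' ') : frcLast s m c = frcLast s' m c := by
  induction m with
  | zero => rfl
  | succ m ih =>
    rw [frcLast_succ, frcLast_succ, h m (by omega), ih (fun i hi => h i (by omega))]

def frcLastPre (pre : List Char) (c : Char) : Option Int :=
  (frcLast pre pre.length c).map (fun i => (i : Int))

theorem frc_candsFrom_eq (rest : List Char) : ∀ (pre : List Char),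
    frcCandsFrom (frcLastPre pre) (pre.length : Int) rest
    = (List.range' pre.length rest.length).filterMap (fun j =>
        (frcLast (pre ++ rest) j ((pre ++ rest).getD j ' ')).map
          (fun i => (((j : Int) - (i : Int)), String.ofList [(pre ++ rest).getD j ' ']))) := by
  induction rest with
  | nil => intro pre; simp [frcCandsFrom]
  | cons x rest ih =>
    intro pre
    have hgx : (pre ++ x :: rest).getD pre.length ' ' = x := by
      rw [List.getD_eq_getElem?_getD]; simp
    have hcongr : ∀ c, frcLast (pre ++ x :: rest) pre.length c = frcLast pre pre.length c := by
      intro c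
      apply frcLast_congr
      intro i hi
      rw [List.getD_eq_getElem?_getD, List.getD_eq_getElem?_getD, List.getElem?_append_left hi]
    have hx1 : (pre ++ [x]).getD pre.length ' ' = x := by
      rw [List.getD_eq_getElem?_getD]; simp
    have hc1 : ∀ c, frcLast (pre ++ [x]) pre.length c = frcLast pre pre.length c := by
      intro c
      apply frcLast_congr
      intro i hi
      rw [List.getD_eq_getElem?_getD, List.getD_eq_getElem?_getD, List.getElem?_append_left hi]
    have henv : (fun c => if c == x then some ((pre.length : Nat) : Int) else frcLastPre pre c)
        = frcLastPre (pre ++ [x]) := by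
      funext c
      simp only [frcLastPre, List.length_append, List.length_singleton, frcLast_succ, hx1, hc1]
      by_cases hc : c = x
      · subst hc; simp
      · have h1 : (c == x) = false := by simp [hc]
        have h2 : ¬ (x = c) := fun h => hc h.symm
        rw [if_neg h2]
        simp [h1]
    have hih := ih (pre ++ [x])
    have hlen : ((pre ++ [x]).length : Int) = (pre.length : Int) + 1 := by simp
    have hassoc : (pre ++ [x]) ++ rest = pre ++ x :: rest := by simp
    rw [hlen, hassoc] at hih
    simp only [List.length_append, List.length_singleton] at hih
    simp only [List.length_cons, List.range'_succ, List.filterMap_cons, hgx, hcongr,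
      frcCandsFrom, henv]
    rcases hlast : frcLastPre pre x with _ | gi
    · have hl2 : frcLast pre pre.length x = none := by
        rcases h : frcLast pre pre.length x with _ | i
        · rfl
        · simp [frcLastPre, h] at hlast
      rw [hl2]
      simpa using hih
    · obtain ⟨i, hi, rfl⟩ : ∃ i, frcLast pre pre.length x = some i ∧ gi = (i : Int) := by
        rcases h : frcLast pre pre.length x with _ | i
        · simp [frcLastPre, h] at hlast
        · simp only [frcLastPre, h] at hlast
          exact ⟨i, rfl, (Option.some_inj.mp hlast).symm⟩
      rw [hi]
      simpa using hih

theorem frcLast_lt_of_some (s : List Char) (m : Nat) (c : Char) (i : Nat)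
    (h : frcLast s m c = some i) : i < m ∧ s.getD i ' ' = c := by
  induction m with
  | zero => simp [frcLast_zero] at h
  | succ m ih =>
    rw [frcLast_succ] at h
    by_cases hc : s.getD m ' ' = c
    · rw [if_pos hc] at h
      obtain rfl : m = i := by simpa using h
      exact ⟨by omega, hc⟩
    · rw [if_neg hc] at h
      obtain ⟨h1, h2⟩ := ih h
      exact ⟨by omega, h2⟩

theorem frcLast_complete (s : List Char) (m : Nat) (c : Char) (i : Nat)
    (hi : i < m) (hc : s.getD i ' ' = c) : ∃ i', frcLast s m c = some i' ∧ i ≤ i' := by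
  induction m with
  | zero => omega
  | succ m ih =>
    rw [frcLast_succ]
    by_cases hm : s.getD m ' ' = c
    · exact ⟨m, by rw [if_pos hm], by omega⟩
    · have him : i < m := by
        rcases Nat.lt_or_ge i m with h | h
        · exact h
        · obtain rfl : i = m := by omega
          exact absurd hc hm
      obtain ⟨i', h1, h2⟩ := ih him
      exact ⟨i', by rw [if_neg hm]; exact h1, h2⟩

def frcHasPair (s : List Char) : Prop :=
  ∃ i j, i < j ∧ j < s.length ∧ s.getD i ' ' = s.getD j ' '

theorem frc_memCandA (s : List Char) (e : Int × String) (he : e ∈ frcCandA s) :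
    ∃ i j, i < j ∧ j < s.length ∧ s.getD i ' ' = s.getD j ' ' ∧
      e = (((j : Int) - (i : Int)), String.ofList [s.getD i ' ']) := by
  rw [frcCandA, List.mem_flatMap] at he
  obtain ⟨i, hi, he⟩ := he
  rw [List.mem_filterMap] at he
  obtain ⟨j, hj, he⟩ := he
  rw [List.mem_range'] at hj
  obtain ⟨k, hk, rfl⟩ := hj
  rw [List.mem_range] at hi
  by_cases hc : s.getD i ' ' = s.getD (i + 1 + 1 * k) ' '
  · rw [if_pos hc] at he
    exact ⟨i, i + 1 + 1 * k, by omega, by omega, hc, by simpa using he.symm⟩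
  · rw [if_neg hc] at he; cases he

theorem frc_memCandB (s : List Char) (e : Int × String) (he : e ∈ frcCandB s) :
    ∃ i j, i < j ∧ j < s.length ∧ s.getD i ' ' = s.getD j ' ' ∧
      e = (((j : Int) - (i : Int)), String.ofList [s.getD j ' ']) := by
  rw [frcCandB, List.mem_filterMap] at he
  obtain ⟨j, hj, he⟩ := he
  rw [List.mem_range] at hj
  rcases hl : frcLast s j (s.getD j ' ') with _ | i
  · rw [hl] at he; cases he
  · rw [hl] at he
    obtain ⟨h1, h2⟩ := frcLast_lt_of_some s j _ i hl
    exact ⟨i, j, h1, hj, h2, by simpa using he.symm⟩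

theorem frc_candA_nil (s : List Char) (h : ¬ frcHasPair s) : frcCandA s = [] := by
  rcases he : frcCandA s with _ | ⟨e, L⟩
  · rfl
  · exfalso
    have : e ∈ frcCandA s := by rw [he]; simp
    obtain ⟨i, j, h1, h2, h3, _⟩ := frc_memCandA s e this
    exact h ⟨i, j, h1, h2, h3⟩

theorem frc_candB_nil (s : List Char) (h : ¬ frcHasPair s) : frcCandB s = [] := by
  rcases he : frcCandB s with _ | ⟨e, L⟩
  · rfl
  · exfalso
    have : e ∈ frcCandB s := by rw [he]; simp
    obtain ⟨i, j, h1, h2, h3, _⟩ := frc_memCandB s e this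
    exact h ⟨i, j, h1, h2, h3⟩

theorem frc_candB_firstMin (s : List Char) (m j0 : Nat)
    (hm0 : 0 < m) (hmj : m ≤ j0) (hj0n : j0 < s.length)
    (hpair : s.getD (j0 - m) ' ' = s.getD j0 ' ')
    (hm_min : ∀ i j, i < j → j < s.length → s.getD i ' ' = s.getD j ' ' → m ≤ j - i)
    (hj0_min : ∀ j, m ≤ j → j < s.length → s.getD (j - m) ' ' = s.getD j ' ' → j0 ≤ j) :
    frcFirstMin (frcCandB s) = some (((m : Nat) : Int), String.ofList [s.getD j0 ' ']) := by
  have hsplit : List.range s.length = List.range' 0 j0 ++ (j0 :: List.range' (j0 + 1) (s.length - j0 - 1)) := by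
    rw [List.range_eq_range']
    rw [show s.length = j0 + (s.length - j0) from by omega, ← List.range'_append]
    congr 1
    rw [show s.length - j0 = 1 + (s.length - j0 - 1) from by omega, ← List.range'_append]
    simp
  -- the candidate at j0
  have hlastj0 : frcLast s j0 (s.getD j0 ' ') = some (j0 - m) := by
    obtain ⟨i', h1, h2⟩ := frcLast_complete s j0 _ (j0 - m) (by omega) hpair
    obtain ⟨h3, h4⟩ := frcLast_lt_of_some s j0 _ i' h1
    have : m ≤ j0 - i' := hm_min i' j0 h3 hj0n h4
    obtain rfl : i' = j0 - m := by omega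
    exact h1
  rw [frcCandB, hsplit, List.filterMap_append, List.filterMap_cons, hlastj0]
  simp only [Option.pure_def, Option.bind_eq_bind, Option.bind_some, Option.map_some]
  have hgap : ((j0 : Int) - ((j0 - m : Nat) : Int)) = ((m : Nat) : Int) := by omega
  rw [hgap]
  apply frc_firstMin_eq
  · -- strict: candidates at j < j0 have gap > m
    intro e he
    rw [List.mem_filterMap] at he
    obtain ⟨j, hj, he⟩ := he
    rw [List.mem_range'] at hj
    obtain ⟨k, hk, rfl⟩ := hj
    simp only [Nat.zero_add] at *
    rcases hl : frcLast s (1 * k) (s.getD (1 * k) ' ') with _ | i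
    · rw [hl] at he; cases he
    · rw [hl] at he
      obtain ⟨h1, h2⟩ := frcLast_lt_of_some s _ _ i hl
      have hjn : 1 * k < s.length := by omega
      have hge : m ≤ 1 * k - i := hm_min i (1 * k) h1 hjn h2
      have hne : 1 * k - i ≠ m := by
        intro hEq
        have : s.getD (1 * k - m) ' ' = s.getD (1 * k) ' ' := by
          rw [show 1 * k - m = i from by omega]; exact h2
        have := hj0_min (1 * k) (by omega) hjn this
        omega
      obtain rfl : e = (((1 * k : Nat) : Int) - (i : Int), String.ofList [s.getD (1 * k) ' ']) := by
        simpa using he.symm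
      simp only []
      omega
  · -- later candidates have gap ≥ m
    intro e he
    rw [List.mem_filterMap] at he
    obtain ⟨j, hj, he⟩ := he
    rw [List.mem_range'] at hj
    obtain ⟨k, hk, rfl⟩ := hj
    rcases hl : frcLast s (j0 + 1 + 1 * k) (s.getD (j0 + 1 + 1 * k) ' ') with _ | i
    · rw [hl] at he; cases he
    · rw [hl] at he
      obtain ⟨h1, h2⟩ := frcLast_lt_of_some s _ _ i hl
      have hge : m ≤ j0 + 1 + 1 * k - i := hm_min i _ h1 (by omega) h2
      obtain rfl : e = (((j0 + 1 + 1 * k : Nat) : Int) - (i : Int), String.ofList [s.getD (j0 + 1 + 1 * k) ' ']) := by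
        simpa using he.symm
      simp only []
      omega

theorem frc_candA_firstMin (s : List Char) (m j0 : Nat)
    (hm0 : 0 < m) (hmj : m ≤ j0) (hj0n : j0 < s.length)
    (hpair : s.getD (j0 - m) ' ' = s.getD j0 ' ')
    (hm_min : ∀ i j, i < j → j < s.length → s.getD i ' ' = s.getD j ' ' → m ≤ j - i)
    (hj0_min : ∀ j, m ≤ j → j < s.length → s.getD (j - m) ' ' = s.getD j ' ' → j0 ≤ j) :
    frcFirstMin (frcCandA s) = some (((m : Nat) : Int), String.ofList [s.getD j0 ' ']) := by
  set i0 := j0 - m with hi0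
  have hsplitO : List.range s.length = List.range' 0 i0 ++ (i0 :: List.range' (i0 + 1) (s.length - i0 - 1)) := by
    rw [List.range_eq_range']
    rw [show s.length = i0 + (s.length - i0) from by omega, ← List.range'_append]
    congr 1
    rw [show s.length - i0 = 1 + (s.length - i0 - 1) from by omega, ← List.range'_append]
    simp
  have hsplitI : List.range' (i0 + 1) (s.length - (i0 + 1)) =
      List.range' (i0 + 1) (j0 - i0 - 1) ++ (j0 :: List.range' (j0 + 1) (s.length - j0 - 1)) := by
    rw [show s.length - (i0 + 1) = (j0 - i0 - 1) + (1 + (s.length - j0 - 1)) from by omega,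
        ← List.range'_append]
    congr 1
    rw [show i0 + 1 + 1 * (j0 - i0 - 1) = j0 from by omega, ← List.range'_append]
    simp
  rw [frcCandA, hsplitO, List.flatMap_append, List.flatMap_cons, hsplitI,
      List.filterMap_append, List.filterMap_cons, if_pos hpair]
  rw [← List.append_assoc, ← List.append_assoc]
  have hgap : ((j0 : Int) - ((i0 : Nat) : Int)) = ((m : Nat) : Int) := by omega
  rw [hgap, hpair]
  rw [List.append_assoc, List.cons_append]
  apply frc_firstMin_eq
  · -- elements before the minimal pair have gap > m
    intro e he
    rw [List.mem_append] at he
    rcases he with he | he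
    · -- blocks i < i0
      rw [List.mem_flatMap] at he
      obtain ⟨i, hi, he⟩ := he
      rw [List.mem_range'] at hi
      obtain ⟨ki, hki, rfl⟩ := hi
      rw [List.mem_filterMap] at he
      obtain ⟨j, hj, he⟩ := he
      rw [List.mem_range'] at hj
      obtain ⟨kj, hkj, rfl⟩ := hj
      set i := 0 + 1 * ki with hidef
      set j := i + 1 + 1 * kj with hjdef
      by_cases hc : s.getD i ' ' = s.getD j ' '
      · rw [if_pos hc] at he
        obtain rfl : e = (((j : Nat) : Int) - ((i : Nat) : Int), String.ofList [s.getD i ' ']) := by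
          simpa using he.symm
        have hjn : j < s.length := by omega
        have hge : m ≤ j - i := hm_min i j (by omega) hjn hc
        have hne : j - i ≠ m := by
          intro hEq
          have : s.getD (j - m) ' ' = s.getD j ' ' := by
            rw [show j - m = i from by omega]; exact hc
          have := hj0_min j (by omega) hjn this
          omega
        simp only []
        omega
      · rw [if_neg hc] at he; cases he
    · -- block i0, i0 < j < j0 : impossible pairs
      rw [List.mem_filterMap] at he
      obtain ⟨j, hj, he⟩ := he
      rw [List.mem_range'] at hj
      obtain ⟨kj, hkj, rfl⟩ := hj
      set j := i0 + 1 + 1 * kj with hjdef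
      by_cases hc : s.getD j0 ' ' = s.getD j ' '
      · exfalso
        have : m ≤ j - i0 := hm_min i0 j (by omega) (by omega) (hpair.trans hc)
        omega
      · rw [if_neg hc] at he; cases he
  · -- elements after: gap ≥ m
    intro e he
    rw [List.mem_append] at he
    rcases he with he | he
    · -- rest of block i0
      rw [List.mem_filterMap] at he
      obtain ⟨j, hj, he⟩ := he
      rw [List.mem_range'] at hj
      obtain ⟨kj, hkj, rfl⟩ := hj
      set j := j0 + 1 + 1 * kj with hjdef
      by_cases hc : s.getD j0 ' ' = s.getD j ' '
      · rw [if_pos hc] at he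
        obtain rfl : e = (((j : Nat) : Int) - ((i0 : Nat) : Int), String.ofList [s.getD j0 ' ']) := by
          simpa using he.symm
        have hge : m ≤ j - i0 := hm_min i0 j (by omega) (by omega) (hpair.trans hc)
        simp only []
        omega
      · rw [if_neg hc] at he; cases he
    · -- blocks i > i0
      rw [List.mem_flatMap] at he
      obtain ⟨i, hi, he⟩ := he
      rw [List.mem_range'] at hi
      obtain ⟨ki, hki, rfl⟩ := hi
      rw [List.mem_filterMap] at he
      obtain ⟨j, hj, he⟩ := he
      rw [List.mem_range'] at hj
      obtain ⟨kj, hkj, rfl⟩ := hj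
      set i := i0 + 1 + 1 * ki with hidef
      set j := i + 1 + 1 * kj with hjdef
      by_cases hc : s.getD i ' ' = s.getD j ' '
      · rw [if_pos hc] at he
        obtain rfl : e = (((j : Nat) : Int) - ((i : Nat) : Int), String.ofList [s.getD i ' ']) := by
          simpa using he.symm
        have hge : m ≤ j - i := hm_min i j (by omega) (by omega) hc
        simp only []
        omega
      · rw [if_neg hc] at he; cases he


theorem frc_exists_min (s : List Char) (h : frcHasPair s) :
    ∃ m j0, 0 < m ∧ m ≤ j0 ∧ j0 < s.length ∧ s.getD (j0 - m) ' ' = s.getD j0 ' ' ∧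
      (∀ i j, i < j → j < s.length → s.getD i ' ' = s.getD j ' ' → m ≤ j - i) ∧
      (∀ j, m ≤ j → j < s.length → s.getD (j - m) ' ' = s.getD j ' ' → j0 ≤ j) := by
  classical
  have hQ : ∃ g, 0 < g ∧ ∃ j, j < s.length ∧ g ≤ j ∧ s.getD (j - g) ' ' = s.getD j ' ' := by
    obtain ⟨i, j, h1, h2, h3⟩ := h
    exact ⟨j - i, by omega, j, h2, by omega, by rw [show j - (j - i) = i from by omega]; exact h3⟩
  obtain ⟨hm0, hQm⟩ := Nat.find_spec hQ
  set m := Nat.find hQ with hmdef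
  have hm_min : ∀ i j, i < j → j < s.length → s.getD i ' ' = s.getD j ' ' → m ≤ j - i := by
    intro i j h1 h2 h3
    apply Nat.find_min' hQ
    exact ⟨by omega, j, h2, by omega, by rw [show j - (j - i) = i from by omega]; exact h3⟩
  have hR : ∃ j, m ≤ j ∧ j < s.length ∧ s.getD (j - m) ' ' = s.getD j ' ' := by
    obtain ⟨j, h1, h2, h3⟩ := hQm
    exact ⟨j, h2, h1, h3⟩
  obtain ⟨h1, h2, h3⟩ := Nat.find_spec hR
  refine ⟨m, Nat.find hR, hm0, h1, h2, h3, hm_min, ?_⟩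
  intro j hj1 hj2 hj3
  exact Nat.find_min' hR ⟨hj1, hj2, hj3⟩

theorem frc_no_pair_ends (s : List Char) (hn2 : 2 ≤ s.length) (hp : ¬ frcHasPair s) :
    ¬ s.getD 0 ' ' = s.getD (s.length - 1) ' ' := by
  intro hEq
  exact hp ⟨0, s.length - 1, by omega, by omega, hEq⟩

theorem frc_main (sample : String) (hpre : sample.toList ≠ [])
    (hnd : sample.toList.length ≠ 1) :
    first_recurring_character_using_nested_loops sample
      = first_recurring_character_using_nested_loops_alt sample := by
  have hn1 : 0 < sample.toList.length := List.length_pos_iff.mpr hpre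
  have hn2 : 2 ≤ sample.toList.length := by omega
  unfold first_recurring_character_using_nested_loops first_recurring_character_using_nested_loops_alt
  rw [frc_portA_fold, frc_portB_fold_match]
  rw [frc_collect_eq_candsFrom sample.toList 0 PySem.Dict.empty (frcLastPre [])
      (by intro c; simp [frcLastPre, frcLast_zero])]
  have hcb : frcCandsFrom (frcLastPre []) 0 sample.toList = frcCandB sample.toList := by
    have h := frc_candsFrom_eq sample.toList []
    simpa [frcCandB, List.range_eq_range'] using h
  rw [hcb, frc_selA, frc_selB_none]
  set s := sample.toList with hs
  set n := s.length with hn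
  by_cases hp : frcHasPair s
  · obtain ⟨m, j0, hm0, hmj, hj0n, hpair, hmin, hj0min⟩ := frc_exists_min s hp
    rw [frc_candA_firstMin s m j0 hm0 hmj hj0n hpair hmin hj0min,
        frc_candB_firstMin s m j0 hm0 hmj hj0n hpair hmin hj0min]
    by_cases hlt : ((m : Nat) : Int) < (n : Int) - 1
    · have hne : (((m : Nat) : Int) == (n : Int) - 1) = false := by
        simp only [beq_eq_false_iff_ne]; omega
      simp [hlt, hne]
    · have hmeq : ((m : Nat) : Int) = (n : Int) - 1 := by omega
      have hj0eq : j0 = n - 1 := by omega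
      have hg0 : PySem.List.pyGet? s 0 = some s[0] := by
        rw [PySem.List.pyGet?_zero, List.getElem?_eq_getElem hn1]
      have hgl : PySem.List.pyGet? s (-1) = some s[n - 1] := by
        rw [PySem.List.pyGet?_neg_one, List.getLast?_eq_getElem?, List.getElem?_eq_getElem (by omega)]
      have hchar : s[0] = s[n - 1] := by
        have h0 : s.getD 0 ' ' = s[0] := List.getD_eq_getElem s ' ' hn1
        have h1 : s.getD (n - 1) ' ' = s[n - 1] := List.getD_eq_getElem s ' ' (by omega)
        have h2 := hpair
        rw [hj0eq, show n - 1 - m = 0 from by omega] at h2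
        rw [← h0, ← h1]
        exact h2
      have hcj : s[j0]?.getD ' ' = s[0] := by
        rw [← List.getD_eq_getElem?_getD, show j0 = n - 1 from hj0eq,
            List.getD_eq_getElem s ' ' (by omega)]
        exact hchar.symm
      rw [hg0, hgl]
      simp [hmeq, hchar, hcj]
  · rw [frc_candA_nil s hp, frc_candB_nil s hp]
    simp only [frc_firstMin_nil]
    have hg0 : PySem.List.pyGet? s 0 = some s[0] := by
      rw [PySem.List.pyGet?_zero, List.getElem?_eq_getElem hn1]
    have hgl : PySem.List.pyGet? s (-1) = some s[n - 1] := by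
      rw [PySem.List.pyGet?_neg_one, List.getLast?_eq_getElem?, List.getElem?_eq_getElem (by omega)]
    have hne : ¬ s[0] = s[n - 1] := by
      intro hEq
      apply frc_no_pair_ends s hn2 hp
      rw [List.getD_eq_getElem s ' ' hn1, List.getD_eq_getElem s ' ' (by omega), hEq]
    rw [hg0, hgl]
    simp [hne]

-- ===== VERDICT (by name: the statement is the Claim_ definition above) =====
theorem first_recurring_character_using_nested_loops_spec : Claim_unchanged_first_recurring_character_using_nested_loops := by
  intro sample hdom hpre hnd
  exact frc_main sample hpre hnd
theorem first_recurring_character_using_nested_loops_changed : Claim_changed_first_recurring_character_using_nested_loops := by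
  unfold Claim_changed_first_recurring_character_using_nested_loops; decide
theorem first_recurring_character_using_nested_loops_tight : Claim_exact_first_recurring_character_using_nested_loops := by
  intro sample hdom hpre hD
  have hD' : sample.toList.length = 1 := hD
  have hp : ¬ frcHasPair sample.toList := by
    rintro ⟨i, j, h1, h2, h3⟩
    omega
  have hn1 : 0 < sample.toList.length := by omega
  unfold first_recurring_character_using_nested_loops first_recurring_character_using_nested_loops_alt
  rw [frc_portA_fold, frc_portB_fold_match]
  rw [frc_collect_eq_candsFrom sample.toList 0 PySem.Dict.empty (frcLastPre [])
      (by intro c; simp [frcLastPre, frcLast_zero])]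
  have hcb : frcCandsFrom (frcLastPre []) 0 sample.toList = frcCandB sample.toList := by
    have h := frc_candsFrom_eq sample.toList []
    simpa [frcCandB, List.range_eq_range'] using h
  rw [hcb, frc_selA, frc_selB_none, frc_candA_nil _ hp, frc_candB_nil _ hp]
  simp only [frc_firstMin_nil]
  have hg0 : PySem.List.pyGet? sample.toList 0 = some sample.toList[0] := by
    rw [PySem.List.pyGet?_zero, List.getElem?_eq_getElem hn1]
  have hgl : PySem.List.pyGet? sample.toList (-1) = some sample.toList[0] := by
    rw [PySem.List.pyGet?_neg_one, List.getLast?_eq_getElem?,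
        show sample.toList.length - 1 = 0 from by omega, List.getElem?_eq_getElem hn1]
  rw [hg0, hgl]
  simp
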